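-- pv_equiv track=rewrite | github.com/Sambhav-Gautam/CF | 800CF/F_Sum_and_Product.py | count_pairs_with_sum_and_product
-- ===== SOURCE A (Python) =====
-- def count_pairs_with_sum_and_product(arr, x, y):
--     count_sum = 0
--     count_product = 0
--     n = len(arr)
--     freq = {}
--
--     for num in arr:
--         freq[num] = freq.get(num, 0) + 1
--
--     for num in arr:
--         complement = x - num
--         if complement in freq:
--             count_sum += freq[complement]
--             if complement == num:
--                 count_sum -= 1
--
--         if y % num == 0:
--             complement_product = y // num
--             if complement_product in freq:
--                 count_product += freq[complement_product]
--                 if complement_product == num: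
--                     count_product -= 1
--
--     return count_sum // 2 - count_product // 2
-- ===== SOURCE B (Python) =====
-- def count_pairs_with_sum_and_product(arr, x, y):
--     count_sum = 0
--     count_product = 0
--     seen = {}
--     for num in arr:
--         count_sum += seen.get(x - num, 0)
--         if y % num == 0:
--             count_product += seen.get(y // num, 0)
--         seen[num] = seen.get(num, 0) + 1
--     return count_sum - count_product
-- ===== Notes on version B (the rewrite author's own statement) =====
-- stated objective: alternative
-- what changed: B makes a single pass with a running 'seen' counter, counting each unordered pair exactly once at its later element and returning count_sum - count_product directly, instead of A's two passes (pre-building a full frequency table, then summing ordered-pair counts with self-pair corrections and halving each total with //2).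
import Mathlib
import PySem

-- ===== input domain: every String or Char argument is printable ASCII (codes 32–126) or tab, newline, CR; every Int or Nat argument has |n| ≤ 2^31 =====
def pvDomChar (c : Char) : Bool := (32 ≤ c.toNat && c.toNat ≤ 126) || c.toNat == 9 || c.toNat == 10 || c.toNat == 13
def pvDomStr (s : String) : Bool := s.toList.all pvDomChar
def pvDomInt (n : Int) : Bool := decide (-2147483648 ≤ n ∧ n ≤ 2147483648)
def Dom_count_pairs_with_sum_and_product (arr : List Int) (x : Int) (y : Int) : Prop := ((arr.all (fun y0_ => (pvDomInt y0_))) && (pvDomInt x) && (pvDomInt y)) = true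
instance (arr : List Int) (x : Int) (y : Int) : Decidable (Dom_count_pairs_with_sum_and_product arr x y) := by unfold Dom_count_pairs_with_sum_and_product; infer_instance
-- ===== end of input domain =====

-- B counts each unordered pair once, at its later element, via a running `seen` counter
-- (one pass, no halving), instead of A's frequency table + ordered-pair counts halved by //2.

-- ===== PORT A =====
def count_pairs_with_sum_and_product (arr : List Int) (x : Int) (y : Int) : Int :=
  let freq : PySem.Dict Int Int :=
    arr.foldl (fun d num => d.insert num (d.getD num 0 + 1)) PySem.Dict.empty
  let p : Int × Int :=
    arr.foldl (fun acc num =>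
      let complement := x - num
      let cs : Int :=
        if freq.contains complement then
          (if complement == num then acc.1 + freq.getD complement 0 - 1
           else acc.1 + freq.getD complement 0)
        else acc.1
      let cp : Int :=
        if PySem.Int.mod y num == 0 then
          let complement_product := PySem.Int.floordiv y num
          if freq.contains complement_product then
            (if complement_product == num then acc.2 + freq.getD complement_product 0 - 1
             else acc.2 + freq.getD complement_product 0)
          else acc.2
        else acc.2
      (cs, cp)) ((0 : Int), (0 : Int))
  PySem.Int.floordiv p.1 2 - PySem.Int.floordiv p.2 2

-- ===== PORT B =====
def count_pairs_with_sum_and_product_alt (arr : List Int) (x : Int) (y : Int) : Int :=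
  let st :=
    arr.foldl (fun (st : PySem.Dict Int Int × Int × Int) num =>
      let seen := st.1
      let cs : Int := st.2.1 + seen.getD (x - num) 0
      let cp : Int :=
        if PySem.Int.mod y num == 0
        then st.2.2 + seen.getD (PySem.Int.floordiv y num) 0
        else st.2.2
      (seen.insert num (seen.getD num 0 + 1), cs, cp))
      (PySem.Dict.empty, (0 : Int), (0 : Int))
  st.2.1 - st.2.2

-- ===== PRECONDITION & SPEC =====
-- Pre_ excludes arrays containing 0, on which Python's `y % num` raises ZeroDivisionError
-- (in A and in B alike); A returns on every other input.
def Pre_count_pairs_with_sum_and_product (arr : List Int) (x : Int) (y : Int) : Prop :=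
  (0 : Int) ∉ arr
instance (arr : List Int) (x : Int) (y : Int) : Decidable (Pre_count_pairs_with_sum_and_product arr x y) := by unfold Pre_count_pairs_with_sum_and_product; infer_instance

def pvWitness_count_pairs_with_sum_and_product : List Int × Int × Int := ([1, 2, 3, 2], 4, 6)

def Spec_count_pairs_with_sum_and_product (arr : List Int) (x : Int) (y : Int) (out : Int) : Prop := out = count_pairs_with_sum_and_product_alt arr x y
instance (arr : List Int) (x : Int) (y : Int) (out : Int) : Decidable (Spec_count_pairs_with_sum_and_product arr x y out) := by unfold Spec_count_pairs_with_sum_and_product; infer_instance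

-- ===== CLAIM (what is proved, stated in full; the proofs are below) =====
def Claim_equal_count_pairs_with_sum_and_product : Prop := ∀ (arr : List Int) (x : Int) (y : Int), Dom_count_pairs_with_sum_and_product arr x y → Pre_count_pairs_with_sum_and_product arr x y → Spec_count_pairs_with_sum_and_product arr x y (count_pairs_with_sum_and_product arr x y)

-- ===== LEMMAS AND PROOFS =====

-- weight of the (unordered) pair (a, b) for the sum condition a + b = x
def pvWS (x a b : Int) : Int := if a + b = x then 1 else 0
-- weight of the pair (a, b) for the product condition, written the way both programs test it
def pvWP (y a b : Int) : Int :=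
  if PySem.Int.mod y a = 0 ∧ b = PySem.Int.floordiv y a then 1 else 0

def pvWsum (w : Int → Int → Int) (l : List Int) (a : Int) : Int := (l.map (w a)).sum

-- prefix-pair sum: Σ over positions i of Σ_{j < i} w a_i a_j, with `pre` the already-seen prefix
def pvAccW (w : Int → Int → Int) : List Int → List Int → Int
  | _, [] => 0
  | pre, a :: l => pvWsum w pre a + pvAccW w (pre ++ [a]) l

theorem pvProd_char (y a b : Int) (ha : a ≠ 0) :
    (PySem.Int.mod y a = 0 ∧ b = PySem.Int.floordiv y a) ↔ a * b = y := by
  constructor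
  · rintro ⟨h1, rfl⟩
    have h := PySem.Int.floordiv_mul_add_mod y a
    rw [h1, add_zero] at h
    linarith [h, mul_comm (PySem.Int.floordiv y a) a]
  · intro h
    have hd : a ∣ y := ⟨b, h.symm⟩
    have h1 : PySem.Int.mod y a = 0 := (PySem.Int.mod_eq_zero_iff_dvd y a).2 hd
    refine ⟨h1, ?_⟩
    have h2 := PySem.Int.floordiv_mul_add_mod y a
    rw [h1, add_zero] at h2
    have : b * a = PySem.Int.floordiv y a * a := by rw [h2, ← h]; ring
    exact mul_right_cancel₀ ha this

theorem pvWS_symm (x a b : Int) : pvWS x a b = pvWS x b a := by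
  unfold pvWS
  exact if_congr (by constructor <;> intro h <;> omega) rfl rfl

theorem pvWP_symm (y a b : Int) (ha : a ≠ 0) (hb : b ≠ 0) : pvWP y a b = pvWP y b a := by
  unfold pvWP
  exact if_congr ((pvProd_char y a b ha).trans (by rw [mul_comm]; exact (pvProd_char y b a hb).symm)) rfl rfl

theorem pvSum_map_add (l : List Int) (f g : Int → Int) :
    (l.map (fun b => f b + g b)).sum = (l.map f).sum + (l.map g).sum := by
  induction l with
  | nil => simp
  | cons b l ih => simp [ih]; ring

theorem pvAccW_append (w : Int → Int → Int) (l : List Int) :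
    ∀ pre a, pvAccW w pre (l ++ [a]) = pvAccW w pre l + pvWsum w (pre ++ l) a := by
  induction l with
  | nil => intro pre a; simp [pvAccW]
  | cons b l ih =>
    intro pre a
    simp only [List.cons_append, pvAccW, ih (pre ++ [b]) a, List.append_assoc,
      List.nil_append]
    ring

-- the halving identity: the ordered-pair total (with self-pairs removed) is twice the prefix-pair sum
theorem pvS_eq_two_accW (w : Int → Int → Int) :
    ∀ l : List Int, (∀ a ∈ l, ∀ b ∈ l, w a b = w b a) →
      (l.map (fun a => pvWsum w l a - w a a)).sum = 2 * pvAccW w [] l := by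
  intro l
  induction l using List.reverseRecOn with
  | nil => intro _; simp [pvAccW]
  | append_singleton l a ih =>
    intro hsymm
    have h1 : ∀ b, pvWsum w (l ++ [a]) b = pvWsum w l b + w b a := by
      intro b; simp [pvWsum]
    have e1 : l.map (fun b => pvWsum w (l ++ [a]) b - w b b)
        = l.map (fun b => (pvWsum w l b - w b b) + w a b) := by
      refine List.map_congr_left (fun b hb => ?_)
      rw [h1, hsymm a (by simp) b (by simp [hb])]
      ring
    have hIH := ih (fun c hc d hd => hsymm c (by simp [hc]) d (by simp [hd]))
    rw [List.map_append, List.sum_append, e1, pvSum_map_add, pvAccW_append]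
    simp only [List.map_singleton, List.sum_singleton, h1, List.nil_append]
    have : (l.map (w a)).sum = pvWsum w l a := rfl
    rw [this] at *
    linarith [hIH]

theorem pvWsum_wS (x : Int) (l : List Int) (a : Int) :
    pvWsum (pvWS x) l a = (l.count (x - a) : Int) := by
  induction l with
  | nil => simp [pvWsum]
  | cons b l ih =>
    simp only [pvWsum, List.map_cons, List.sum_cons, List.count_cons] at *
    rw [ih]
    by_cases h : a + b = x
    · have hb : b = x - a := by omega
      simp [pvWS, hb]
      ring
    · have hb : ¬ b = x - a := by omega
      simp [pvWS, hb]
      omega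

theorem pvWsum_wP (y : Int) (l : List Int) (a : Int) :
    pvWsum (pvWP y) l a
      = if PySem.Int.mod y a = 0 then (l.count (PySem.Int.floordiv y a) : Int) else 0 := by
  induction l with
  | nil => simp [pvWsum]
  | cons b l ih =>
    simp only [pvWsum, List.map_cons, List.sum_cons, List.count_cons] at *
    rw [ih]
    by_cases hm : PySem.Int.mod y a = 0
    · by_cases hb : b = PySem.Int.floordiv y a
      · simp [pvWP, hm, hb]
        ring
      · simp [pvWP, hm, hb]
    · simp [pvWP, hm]

theorem pvCounter_step (pre : List Int) (a : Int) :
    (PySem.Dict.counter pre).insert a ((PySem.Dict.counter pre).getD a 0 + 1)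
      = PySem.Dict.counter (pre ++ [a]) := by
  rw [← PySem.Dict.foldl_insert_getD_add_one_eq_counter pre,
      ← PySem.Dict.foldl_insert_getD_add_one_eq_counter (pre ++ [a]),
      List.foldl_append]
  rfl

-- ===== A-side characterisation =====

theorem pvA_cs_step (arr : List Int) (x a cs : Int) (ha : a ∈ arr) :
    (if (PySem.Dict.counter arr).contains (x - a) then
       (if (x - a) == a then cs + (PySem.Dict.counter arr).getD (x - a) 0 - 1
        else cs + (PySem.Dict.counter arr).getD (x - a) 0)
     else cs)
      = cs + (pvWsum (pvWS x) arr a - pvWS x a a) := by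
  rw [PySem.Dict.contains_counter, PySem.Dict.getD_counter, pvWsum_wS]
  by_cases hc : (x - a) ∈ arr
  · have hcc : arr.contains (x - a) = true := by simpa using hc
    rw [hcc, if_pos rfl]
    by_cases he : x - a = a
    · have hw : pvWS x a a = 1 := by simp [pvWS]; omega
      have hbe : ((x - a) == a) = true := by simp [he]
      rw [hbe, if_pos rfl, hw]; ring
    · have hw : pvWS x a a = 0 := by simp [pvWS]; omega
      have hbe : ((x - a) == a) = false := by simp [he]
      rw [hbe, if_neg (by simp), hw]; ring
  · have hcc : arr.contains (x - a) = false := by simpa using hc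
    have h0 : arr.count (x - a) = 0 := List.count_eq_zero.2 hc
    have hw : pvWS x a a = 0 := by
      simp only [pvWS, ite_eq_right_iff]
      intro hx; exfalso; apply hc
      have hxa : x - a = a := by omega
      rw [hxa]; exact ha
    rw [hcc, if_neg (by simp), h0, hw]; ring

theorem pvA_cp_step (arr : List Int) (y a cp : Int) (ha : a ∈ arr) :
    (if PySem.Int.mod y a == 0 then
       (if (PySem.Dict.counter arr).contains (PySem.Int.floordiv y a) then
          (if PySem.Int.floordiv y a == a then cp + (PySem.Dict.counter arr).getD (PySem.Int.floordiv y a) 0 - 1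
           else cp + (PySem.Dict.counter arr).getD (PySem.Int.floordiv y a) 0)
        else cp)
     else cp)
      = cp + (pvWsum (pvWP y) arr a - pvWP y a a) := by
  rw [PySem.Dict.contains_counter, PySem.Dict.getD_counter, pvWsum_wP]
  by_cases hm : PySem.Int.mod y a = 0
  · have hmb : (PySem.Int.mod y a == 0) = true := by simp [hm]
    rw [hmb, if_pos rfl, if_pos hm]
    by_cases hc : PySem.Int.floordiv y a ∈ arr
    · have hcc : arr.contains (PySem.Int.floordiv y a) = true := by simpa using hc
      rw [hcc, if_pos rfl]
      by_cases he : PySem.Int.floordiv y a = a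
      · have hw : pvWP y a a = 1 := by unfold pvWP; rw [if_pos ⟨hm, he.symm⟩]
        have hbe : (PySem.Int.floordiv y a == a) = true := by simp [he]
        rw [hbe, if_pos rfl, hw]; ring
      · have hw : pvWP y a a = 0 := by
          simp only [pvWP, ite_eq_right_iff]
          exact fun h => absurd h.2.symm he
        have hbe : (PySem.Int.floordiv y a == a) = false := by simp [he]
        rw [hbe, if_neg (by simp), hw]; ring
    · have hcc : arr.contains (PySem.Int.floordiv y a) = false := by simpa using hc
      have h0 : arr.count (PySem.Int.floordiv y a) = 0 := List.count_eq_zero.2 hc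
      have hw : pvWP y a a = 0 := by
        simp only [pvWP, ite_eq_right_iff]
        intro h; exfalso; apply hc; rw [← h.2]; exact ha
      rw [hcc, if_neg (by simp), h0, hw]; ring
  · have hmb : (PySem.Int.mod y a == 0) = false := by simp [hm]
    have hw : pvWP y a a = 0 := by simp [pvWP, hm]
    rw [hmb, if_neg (by simp), if_neg hm, hw]; ring

theorem pvFoldl_pair (l : List Int) (f g : Int → Int) :
    ∀ cs cp : Int,
      l.foldl (fun (acc : Int × Int) a => (acc.1 + f a, acc.2 + g a)) (cs, cp)
        = (cs + (l.map f).sum, cp + (l.map g).sum) := by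
  induction l with
  | nil => intro cs cp; simp
  | cons a l ih =>
    intro cs cp
    simp only [List.foldl_cons, ih, List.map_cons, List.sum_cons]
    simp only [Prod.mk.injEq]
    constructor <;> ring

theorem pvA_char (arr : List Int) (x y : Int) :
    count_pairs_with_sum_and_product arr x y
      = PySem.Int.floordiv ((arr.map (fun a => pvWsum (pvWS x) arr a - pvWS x a a)).sum) 2
        - PySem.Int.floordiv ((arr.map (fun a => pvWsum (pvWP y) arr a - pvWP y a a)).sum) 2 := by
  unfold count_pairs_with_sum_and_product
  dsimp only
  rw [PySem.Dict.foldl_insert_getD_add_one_eq_counter]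
  rw [PySem.List.foldl_congr_mem arr _
      (fun (acc : Int × Int) a =>
        (acc.1 + (pvWsum (pvWS x) arr a - pvWS x a a),
         acc.2 + (pvWsum (pvWP y) arr a - pvWP y a a)))
      ((0 : Int), (0 : Int))
      (fun acc a ha => by
        dsimp only
        rw [pvA_cs_step arr x a acc.1 ha, pvA_cp_step arr y a acc.2 ha])]
  rw [pvFoldl_pair]
  simp

-- ===== B-side characterisation =====

theorem pvB_run (x y : Int) (l : List Int) :
    ∀ (pre : List Int) (cs cp : Int),
      l.foldl (fun (st : PySem.Dict Int Int × Int × Int) num =>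
          (st.1.insert num (st.1.getD num 0 + 1),
           st.2.1 + st.1.getD (x - num) 0,
           if PySem.Int.mod y num == 0
           then st.2.2 + st.1.getD (PySem.Int.floordiv y num) 0
           else st.2.2))
        (PySem.Dict.counter pre, cs, cp)
      = (PySem.Dict.counter (pre ++ l),
         cs + pvAccW (pvWS x) pre l,
         cp + pvAccW (pvWP y) pre l) := by
  induction l with
  | nil => intro pre cs cp; simp [pvAccW]
  | cons a l ih =>
    intro pre cs cp
    simp only [List.foldl_cons]
    rw [pvCounter_step pre a, PySem.Dict.getD_counter, PySem.Dict.getD_counter,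
        ih (pre ++ [a])]
    have hs : cs + (pre.count (x - a) : Int) + pvAccW (pvWS x) (pre ++ [a]) l
        = cs + pvAccW (pvWS x) pre (a :: l) := by
      simp only [pvAccW, pvWsum_wS]; ring
    have hp : (if PySem.Int.mod y a == 0
                then cp + (pre.count (PySem.Int.floordiv y a) : Int) else cp)
          + pvAccW (pvWP y) (pre ++ [a]) l
        = cp + pvAccW (pvWP y) pre (a :: l) := by
      simp only [pvAccW, pvWsum_wP]
      by_cases hm : PySem.Int.mod y a = 0
      · simp [hm]; ring
      · simp [hm]
    rw [hs, hp, List.append_assoc, List.singleton_append]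

theorem pvB_char (arr : List Int) (x y : Int) :
    count_pairs_with_sum_and_product_alt arr x y
      = pvAccW (pvWS x) [] arr - pvAccW (pvWP y) [] arr := by
  unfold count_pairs_with_sum_and_product_alt
  have h0 : (PySem.Dict.empty : PySem.Dict Int Int) = PySem.Dict.counter [] := rfl
  rw [h0, pvB_run x y arr []]
  simp

theorem pvFloordiv_two_mul (t : Int) : PySem.Int.floordiv (2 * t) 2 = t := by
  rw [PySem.Int.floordiv_eq_ediv_of_pos (by norm_num)]
  omega

-- ===== VERDICT (by name: the statement is the Claim_ definition above) =====
theorem count_pairs_with_sum_and_product_spec : Claim_equal_count_pairs_with_sum_and_product := by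
  intro arr x y _ hpre
  unfold Spec_count_pairs_with_sum_and_product
  have hS := pvS_eq_two_accW (pvWS x) arr (fun a _ b _ => pvWS_symm x a b)
  have hP := pvS_eq_two_accW (pvWP y) arr
    (fun a ha b hb => pvWP_symm y a b (fun h => hpre (h ▸ ha)) (fun h => hpre (h ▸ hb)))
  rw [pvA_char, pvB_char, hS, hP, pvFloordiv_two_mul, pvFloordiv_two_mul]
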